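-- pv_equiv track=rewrite | github.com/mary-bauman/ICPC2019 | C/C.py | checkConsecutiveColumns
-- ===== SOURCE A (Python) =====
-- def checkConsecutiveColumns(grid):
-- #Check for consecutive row
--     for i in range(len(grid[0])):
--         consecutive = 0
--         for j in range(len(grid) - 1):
--             if grid[j][i] == grid[j + 1][i]:
--                 consecutive += 1
--             else:
--                 consecutive = 0
--             if consecutive > 1:
--                 return False
--     return True
-- ===== SOURCE B (Python) =====
-- def checkConsecutiveColumns(grid):
--     cols = len(grid[0])
--     for j in range(len(grid) - 2):
--         for i in range(cols):
--             if grid[j][i] == grid[j + 1][i] == grid[j + 2][i]: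
--                 return False
--     return True
-- ===== Notes on version B (the rewrite author's own statement) =====
-- stated objective: simpler
-- what changed: Replaces A's column-major scan carrying a running 'consecutive' counter with a stateless row-major sweep that tests each fixed three-cell vertical window directly.
-- outside the precondition, e.g. on checkConsecutiveColumns([[1], [1], [1], []]): A returns False, B returns False
import Mathlib
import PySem

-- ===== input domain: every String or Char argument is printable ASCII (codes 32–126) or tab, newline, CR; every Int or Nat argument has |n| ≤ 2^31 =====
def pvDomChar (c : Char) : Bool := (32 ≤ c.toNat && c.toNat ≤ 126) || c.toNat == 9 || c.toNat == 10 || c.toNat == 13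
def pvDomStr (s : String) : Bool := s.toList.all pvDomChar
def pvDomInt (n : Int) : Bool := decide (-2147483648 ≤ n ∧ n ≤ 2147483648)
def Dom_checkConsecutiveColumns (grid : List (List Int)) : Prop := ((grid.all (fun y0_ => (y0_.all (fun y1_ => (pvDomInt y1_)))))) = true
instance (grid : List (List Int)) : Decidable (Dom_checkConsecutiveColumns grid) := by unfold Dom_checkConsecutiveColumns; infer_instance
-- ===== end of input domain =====

-- B replaces A's column-major scan with a running 'consecutive' counter by a stateless
-- row-major sweep testing each fixed three-cell vertical window directly (objective: simpler).


-- ===== PORT A =====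
-- grid[j][i]; in range under Pre_, default never reached there
def pvCell (grid : List (List Int)) (j i : Int) : Int :=
  PySem.List.pyGetD (PySem.List.pyGetD grid j []) i 0

-- inner loop: for j in range(len(grid)-1), carrying 'consecutive'
def aLoopJ (grid : List (List Int)) (i : Int) : List Int → Int → Bool
  | [], _ => true
  | j :: js, c =>
    let c' := if pvCell grid j i == pvCell grid (j + 1) i then c + 1 else 0
    if c' > 1 then false else aLoopJ grid i js c'

-- outer loop: for i in range(len(grid[0]))
def aLoopI (grid : List (List Int)) : List Int → Bool
  | [] => true
  | i :: is =>
    if aLoopJ grid i (PySem.List.pyRange 0 ((grid.length : Int) - 1) 1) 0 then aLoopI grid is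
    else false

def checkConsecutiveColumns (grid : List (List Int)) : Bool :=
  aLoopI grid (PySem.List.pyRange 0 ((PySem.List.pyGetD grid 0 []).length : Int) 1)

-- ===== PORT B =====
-- inner loop: for i in range(cols), test the three-cell window at (j, i)
def bLoopI (grid : List (List Int)) (j : Int) : List Int → Bool
  | [] => true
  | i :: is =>
    if (pvCell grid j i == pvCell grid (j + 1) i) && (pvCell grid (j + 1) i == pvCell grid (j + 2) i)
    then false else bLoopI grid j is

-- outer loop: for j in range(len(grid)-2)
def bLoopJ (grid : List (List Int)) (cols : List Int) : List Int → Bool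
  | [] => true
  | j :: js => if bLoopI grid j cols then bLoopJ grid cols js else false

def checkConsecutiveColumns_alt (grid : List (List Int)) : Bool :=
  bLoopJ grid (PySem.List.pyRange 0 ((PySem.List.pyGetD grid 0 []).length : Int) 1)
              (PySem.List.pyRange 0 ((grid.length : Int) - 2) 1)

-- ===== PRECONDITION & SPEC =====
-- Pre_ excludes empty grids (len(grid[0]) raises IndexError) and ragged grids where some row is
-- shorter than the first row (indexing such a row raises IndexError unless an early return hides it);
-- on the latter A may still return by accident of the early return, which Pre_ also excludes.
def Pre_checkConsecutiveColumns (grid : List (List Int)) : Prop :=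
  grid ≠ [] ∧ ∀ row ∈ grid, (PySem.List.pyGetD grid 0 []).length ≤ row.length
instance (grid : List (List Int)) : Decidable (Pre_checkConsecutiveColumns grid) := by
  unfold Pre_checkConsecutiveColumns; infer_instance
def pvWitness_checkConsecutiveColumns : List (List Int) := [[1, 2], [1, 1], [2, 1]]

def Spec_checkConsecutiveColumns (grid : List (List Int)) (out : Bool) : Prop := out = checkConsecutiveColumns_alt grid
instance (grid : List (List Int)) (out : Bool) : Decidable (Spec_checkConsecutiveColumns grid out) := by unfold Spec_checkConsecutiveColumns; infer_instance

-- ===== CLAIM (what is proved, stated in full; the proofs are below) =====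
def Claim_equal_checkConsecutiveColumns : Prop := ∀ (grid : List (List Int)), Dom_checkConsecutiveColumns grid → Pre_checkConsecutiveColumns grid → Spec_checkConsecutiveColumns grid (checkConsecutiveColumns grid)

-- ===== LEMMAS AND PROOFS =====

-- the vertical pair test grid[j][i] == grid[j+1][i]
def pairB (grid : List (List Int)) (i j : Int) : Bool :=
  pvCell grid j i == pvCell grid (j + 1) i

lemma cond_eq (grid : List (List Int)) (i j : Int) :
    (pairB grid i j && pairB grid i (j + 1)) =
      ((pvCell grid j i == pvCell grid (j + 1) i) && (pvCell grid (j + 1) i == pvCell grid (j + 2) i)) := by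
  unfold pairB
  rw [show j + 1 + 1 = j + 2 from by ring]

-- A's counter loop, abstracted to the only state that matters: 'armed' = previous pair was equal
def okA (grid : List (List Int)) (i : Int) : List Int → Bool → Bool
  | [], _ => true
  | j :: js, armed =>
    if pairB grid i j then (if armed then false else okA grid i js true) else okA grid i js false

lemma aLoopJ_eq_okA (grid : List (List Int)) (i : Int) :
    ∀ (js : List Int) (c : Int), 0 ≤ c → aLoopJ grid i js c = okA grid i js (decide (0 < c)) := by
  intro js
  induction js with
  | nil => intro c _; rfl
  | cons j js ih =>
    intro c hc
    simp only [aLoopJ, okA, pairB]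
    by_cases hp : (pvCell grid j i == pvCell grid (j + 1) i) = true
    · simp only [hp, if_true]
      by_cases ha : 0 < c
      · have : c + 1 > 1 := by omega
        simp [this, ha]
      · have h1 : ¬ (c + 1 > 1) := by omega
        simp only [h1, if_false]
        rw [ih (c + 1) (by omega)]
        simp [show (0 : Int) < c + 1 by omega, ha]
    · simp only [hp, if_false, Bool.false_eq_true]
      have h0 : ¬ ((0 : Int) > 1) := by omega
      simp only [h0, if_false]
      rw [ih 0 le_rfl]
      simp

-- the RHS characterisation of okA on a range, as one predicate
def OkSpec (grid : List (List Int)) (i a b : Int) (armed : Bool) : Prop :=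
  (armed = true → a < b → pairB grid i a = false) ∧
    ∀ j : Int, a ≤ j → j + 1 < b → ¬(pairB grid i j = true ∧ pairB grid i (j + 1) = true)

lemma okSpec_trivial (grid : List (List Int)) (i a b : Int) (armed : Bool) (h : b ≤ a) :
    OkSpec grid i a b armed :=
  ⟨fun _ hb => absurd hb (by omega), fun j hj hj1 => absurd hj1 (by omega)⟩

lemma okA_range (grid : List (List Int)) (i : Int) :
    ∀ (n : ℕ) (a b : Int) (armed : Bool), b - a ≤ (n : Int) →
    (okA grid i (PySem.List.pyRange a b 1) armed = true ↔ OkSpec grid i a b armed) := by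
  intro n
  induction n with
  | zero =>
    intro a b armed h
    rw [PySem.List.pyRange_one_eq_nil (by omega)]
    exact iff_of_true rfl (okSpec_trivial grid i a b armed (by omega))
  | succ n ih =>
    intro a b armed h
    by_cases hba : b ≤ a
    · rw [PySem.List.pyRange_one_eq_nil hba]
      exact iff_of_true rfl (okSpec_trivial grid i a b armed hba)
    have hab : a < b := by omega
    rw [PySem.List.pyRange_one_cons hab]
    show (if pairB grid i a then (if armed then false else okA grid i _ true)
          else okA grid i _ false) = true ↔ _
    unfold OkSpec
    by_cases hp : pairB grid i a = true
    · rw [hp, if_pos rfl]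
      cases armed with
      | true =>
        rw [if_pos rfl]
        refine iff_of_false (by simp) ?_
        rintro ⟨h1, -⟩
        exact absurd (h1 rfl hab) (by simp)
      | false =>
        rw [if_neg (by simp)]
        rw [ih (a + 1) b true (by omega)]
        unfold OkSpec
        constructor
        · rintro ⟨h1, h2⟩
          refine ⟨fun hf => absurd hf (by simp), ?_⟩
          intro j hj hj1
          rcases eq_or_lt_of_le hj with rfl | hlt
          · rintro ⟨-, hp1⟩
            have := h1 rfl (by omega)
            rw [hp1] at this
            exact absurd this (by simp)
          · exact h2 j (by omega) hj1
        · rintro ⟨-, h2⟩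
          refine ⟨?_, fun j hj hj1 => h2 j (by omega) hj1⟩
          intro _ hab1
          by_contra hne
          have hp1 : pairB grid i (a + 1) = true := by
            cases hgoal : pairB grid i (a + 1) with
            | false => exact absurd hgoal hne
            | true => rfl
          exact h2 a le_rfl (by omega) ⟨hp, hp1⟩
    · have hpf : pairB grid i a = false := by
        cases hx : pairB grid i a with
        | false => rfl
        | true => exact absurd hx hp
      rw [hpf, if_neg (by simp)]
      rw [ih (a + 1) b false (by omega)]
      unfold OkSpec
      constructor
      · rintro ⟨-, h2⟩
        refine ⟨fun _ _ => rfl, ?_⟩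
        intro j hj hj1
        rcases eq_or_lt_of_le hj with rfl | hlt
        · rintro ⟨hpa, -⟩; exact absurd hpa hp
        · exact h2 j (by omega) hj1
      · rintro ⟨-, h2⟩
        exact ⟨fun hf => absurd hf (by simp), fun j hj hj1 => h2 j (by omega) hj1⟩

lemma aLoopI_eq_all (grid : List (List Int)) :
    ∀ (is : List Int), aLoopI grid is =
      is.all (fun i => aLoopJ grid i (PySem.List.pyRange 0 ((grid.length : Int) - 1) 1) 0) := by
  intro is
  induction is with
  | nil => rfl
  | cons i is ih =>
    simp only [aLoopI, List.all_cons, ih]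
    by_cases h : aLoopJ grid i (PySem.List.pyRange 0 ((grid.length : Int) - 1) 1) 0 = true
    · simp [h]
    · simp [Bool.eq_false_iff.mpr h]

lemma bLoopI_eq_all (grid : List (List Int)) (j : Int) :
    ∀ (is : List Int), bLoopI grid j is =
      is.all (fun i => !(pairB grid i j && pairB grid i (j + 1))) := by
  intro is
  induction is with
  | nil => rfl
  | cons i is ih =>
    show (if ((pvCell grid j i == pvCell grid (j + 1) i) && (pvCell grid (j + 1) i == pvCell grid (j + 2) i)) = true
          then false else bLoopI grid j is) = _
    rw [← cond_eq grid i j, ih, List.all_cons]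
    cases hc : (pairB grid i j && pairB grid i (j + 1)) <;> simp [hc]

lemma bLoopJ_eq_all (grid : List (List Int)) (cols : List Int) :
    ∀ (js : List Int), bLoopJ grid cols js = js.all (fun j => bLoopI grid j cols) := by
  intro js
  induction js with
  | nil => rfl
  | cons j js ih =>
    simp only [bLoopJ, List.all_cons, ih]
    by_cases h : bLoopI grid j cols = true
    · simp [h]
    · simp [Bool.eq_false_iff.mpr h]

lemma ports_agree (grid : List (List Int)) :
    checkConsecutiveColumns grid = checkConsecutiveColumns_alt grid := by
  unfold checkConsecutiveColumns checkConsecutiveColumns_alt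
  rw [aLoopI_eq_all, bLoopJ_eq_all]
  rw [Bool.eq_iff_iff]
  simp only [List.all_eq_true]
  constructor
  · intro hA j hj
    rw [bLoopI_eq_all]
    simp only [List.all_eq_true]
    intro i hi
    have hAi := hA i hi
    rw [aLoopJ_eq_okA grid i _ 0 le_rfl,
        decide_eq_false (by omega : ¬ (0:Int) < 0),
        okA_range grid i grid.length 0 ((grid.length : Int) - 1) false (by omega)] at hAi
    have hjm := (PySem.List.mem_pyRange_one).mp hj
    have hnp := hAi.2 j hjm.1 (by omega)
    cases hx : (pairB grid i j && pairB grid i (j + 1)) with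
    | false => simp
    | true =>
      simp only [Bool.and_eq_true] at hx
      exact absurd ⟨hx.1, hx.2⟩ hnp
  · intro hB i hi
    rw [aLoopJ_eq_okA grid i _ 0 le_rfl,
        decide_eq_false (by omega : ¬ (0:Int) < 0),
        okA_range grid i grid.length 0 ((grid.length : Int) - 1) false (by omega)]
    refine ⟨fun hf => absurd hf (by simp), ?_⟩
    rintro j hj hj1 ⟨hp1, hp2⟩
    have hjmem : j ∈ PySem.List.pyRange 0 ((grid.length : Int) - 2) 1 :=
      (PySem.List.mem_pyRange_one).mpr ⟨hj, by omega⟩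
    have hBj := hB j hjmem
    rw [bLoopI_eq_all] at hBj
    simp only [List.all_eq_true] at hBj
    have := hBj i hi
    simp [hp1, hp2] at this

-- ===== VERDICT (by name: the statement is the Claim_ definition above) =====
theorem checkConsecutiveColumns_spec : Claim_equal_checkConsecutiveColumns := by
  intro grid _ _
  unfold Spec_checkConsecutiveColumns
  exact ports_agree grid
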